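-- pv_equiv track=rewrite | github.com/hslim9400/ALG | 2023/0306/pg_68646.py | solution
-- ===== SOURCE A (Python) =====
-- def solution(a):
--     answer = min(len(a), 2)
--     possibles = [False] * len(a)
--     # 왼쪽 오른쪽을 모두 움직이며 수행
--     left_min = a[0]
--     for i in range(1, len(a)-1):
--         number = a[i]
--         if number < left_min:
--             possibles[i] = True
--             left_min = number
--     right_min = a[-1]
--     for i in range(len(a)-2, 0, -1):
--         number = a[i]
--         if number > right_min:
--             if possibles[i]:
--                 answer += 1
--         else:
--             answer += 1
--             right_min = number
--
--     return answer
-- ===== SOURCE B (Python) =====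
-- def solution(a):
--     n = len(a)
--     first = a[0]
--     if n <= 2:
--         return n
--
--     def count(lo, hi, pmin, smin):
--         # counts i in [lo, hi) that are strict new prefix minima (w.r.t. pmin and
--         # elements left of i inside the segment) or <= the suffix minimum (w.r.t.
--         # smin and elements right of i inside the segment)
--         if hi - lo == 1:
--             x = a[lo]
--             return 1 if (x < pmin or x <= smin) else 0
--         mid = (lo + hi) // 2
--         lmin = min(a[lo:mid])
--         rmin = min(a[mid:hi])
--         return count(lo, mid, pmin, min(rmin, smin)) + count(mid, hi, min(lmin, pmin), smin)
--
--     return 2 + count(1, n - 1, first, a[n - 1])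
-- ===== Notes on version B (the rewrite author's own statement) =====
-- stated objective: alternative
-- what changed: Replaces A's two stateful index scans with a shared boolean mask by a divide-and-conquer recursion that splits the interior in half, passes the outer prefix/suffix minima (updated with slice minima) down each half, and sums the counts of the halves.
import Mathlib
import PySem

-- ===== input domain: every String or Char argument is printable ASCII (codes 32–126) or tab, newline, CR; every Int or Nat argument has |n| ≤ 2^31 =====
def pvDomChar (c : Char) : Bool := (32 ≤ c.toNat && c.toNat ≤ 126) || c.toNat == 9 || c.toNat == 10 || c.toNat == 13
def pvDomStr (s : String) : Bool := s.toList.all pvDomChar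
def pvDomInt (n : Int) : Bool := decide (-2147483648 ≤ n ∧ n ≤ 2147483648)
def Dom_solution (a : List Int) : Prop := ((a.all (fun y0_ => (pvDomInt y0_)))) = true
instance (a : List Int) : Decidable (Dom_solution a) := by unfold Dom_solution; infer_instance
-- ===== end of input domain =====

-- B replaces A's two stateful index scans over a shared boolean mask by a divide-and-conquer
-- recursion that splits the interior in half, passing the outer prefix/suffix minima (updated
-- with slice minima) down each half; objective: a genuinely different algorithm of similar size.

-- ===== PORT A =====
-- body of A's first for-loop (state: possibles, left_min)
def aLoop1 (a : List Int) (s : List Bool × Int) (i : Int) : List Bool × Int :=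
  let number := PySem.List.pyGetD a i 0
  if number < s.2 then (PySem.List.pySetD s.1 i true, number) else s

-- body of A's second for-loop (state: answer, right_min; possibles read-only)
def aLoop2 (a : List Int) (possibles : List Bool) (s : Int × Int) (i : Int) : Int × Int :=
  let number := PySem.List.pyGetD a i 0
  if number > s.2 then
    (if PySem.List.pyGetD possibles i false then s.1 + 1 else s.1, s.2)
  else (s.1 + 1, number)

def solution (a : List Int) : Int :=
  let answer : Int := min (a.length : Int) 2
  let possibles : List Bool := List.replicate a.length false
  let left_min : Int := PySem.List.pyGetD a 0 0
  let st1 := (PySem.List.pyRange 1 ((a.length : Int) - 1) 1).foldl (aLoop1 a) (possibles, left_min)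
  let right_min : Int := PySem.List.pyGetD a (-1) 0
  let st2 := (PySem.List.pyRange ((a.length : Int) - 2) 0 (-1)).foldl (aLoop2 a st1.1) (answer, right_min)
  st2.1

-- ===== PORT B =====
-- B's nested helper `count(lo, hi, pmin, smin)`: divide-and-conquer over the interval [lo, hi).
-- Python's min(slice) (first extremal, slice always nonempty here) is PySem.List.min? + getD;
-- the `else 0` branch is a totality guard only (Python never calls count with hi ≤ lo).
def bCount (a : List Int) (lo hi : Nat) (pmin smin : Int) : Int :=
  if hi - lo = 1 then
    let x := PySem.List.pyGetD a (lo : Int) 0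
    if x < pmin ∨ x ≤ smin then 1 else 0
  else if _h2 : lo < hi then
    let mid := (lo + hi) / 2
    let lmin := (PySem.List.min? (PySem.List.slice a (some (lo : Int)) (some (mid : Int))) (fun x => x)).getD 0
    let rmin := (PySem.List.min? (PySem.List.slice a (some (mid : Int)) (some (hi : Int))) (fun x => x)).getD 0
    bCount a lo mid pmin (min rmin smin) + bCount a mid hi (min lmin pmin) smin
  else 0
termination_by hi - lo
decreasing_by all_goals omega

def solution_alt (a : List Int) : Int :=
  let n : Int := a.length
  let first : Int := PySem.List.pyGetD a 0 0
  if n ≤ 2 then n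
  else 2 + bCount a 1 (a.length - 1) first (PySem.List.pyGetD a (n - 1) 0)

-- ===== PRECONDITION & SPEC =====
-- Pre_ excludes only the empty list, on which A (and B alike) raises IndexError when reading the first element.
def Pre_solution (a : List Int) : Prop := a ≠ []
instance (a : List Int) : Decidable (Pre_solution a) := by unfold Pre_solution; infer_instance
def pvWitness_solution : List Int := ([1, 3, 2])

def Spec_solution (a : List Int) (out : Int) : Prop := out = solution_alt a
instance (a : List Int) (out : Int) : Decidable (Spec_solution a out) := by unfold Spec_solution; infer_instance

-- ===== CLAIM (what is proved, stated in full; the proofs are below) =====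
def Claim_equal_solution : Prop := ∀ (a : List Int), Dom_solution a → Pre_solution a → Spec_solution a (solution a)

-- ===== LEMMAS AND PROOFS =====

-- prefix minimum of a[0..k]
def pm (a : List Int) : Nat → Int
  | 0 => a.getD 0 0
  | k + 1 => min (pm a k) (a.getD (k + 1) 0)

-- suffix minimum of a[k..n-1]
def sm (a : List Int) (k : Nat) : Int :=
  if _ : k + 1 < a.length then min (sm a (k + 1)) (a.getD k 0) else a.getD k 0
termination_by a.length - k

-- minimum of a[lo..hi-1] (lo < hi), as a fold over the index range
def segM (a : List Int) (lo hi : Nat) : Int :=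
  (List.range' lo (hi - lo)).foldl (fun m i => min m (a.getD i 0)) (a.getD lo 0)

-- the per-index survivor test both programs compute at interior index i
def condI (a : List Int) (i : Int) : Bool :=
  decide (PySem.List.pyGetD a i 0 < pm a (i.toNat - 1)) ||
  decide (PySem.List.pyGetD a i 0 ≤ sm a (i.toNat + 1))

def condN (a : List Int) (j : Nat) : Bool :=
  decide (a.getD j 0 < pm a (j - 1)) || decide (a.getD j 0 ≤ sm a (j + 1))

theorem getD_set_lt {α : Type} (l : List α) (m n : Nat) (v d : α) (h : n < l.length) :
    (l.set m v).getD n d = if m = n then v else l.getD n d := by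
  simp [List.getD, List.getElem?_set_of_lt v l h]
  split <;> simp

theorem pyRange_neg_one_snoc (x y : Int) (h : y ≤ x) :
    PySem.List.pyRange x (y - 1) (-1) = PySem.List.pyRange x y (-1) ++ [y] := by
  rw [PySem.List.pyRange_neg_one_eq_reverse, PySem.List.pyRange_neg_one_eq_reverse,
      show y - 1 + 1 = y by ring,
      PySem.List.pyRange_one_cons (by omega : y < x + 1)]
  simp

theorem pm_succ (a : List Int) (m : Nat) (h : 1 ≤ m) :
    pm a m = min (pm a (m - 1)) (a.getD m 0) := by
  obtain ⟨k, rfl⟩ : ∃ k, m = k + 1 := ⟨m - 1, by omega⟩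
  simp [pm]

theorem sm_succ (a : List Int) (k : Nat) (h : k + 1 < a.length) :
    sm a k = min (sm a (k + 1)) (a.getD k 0) := by
  rw [sm, dif_pos h]

theorem sm_last (a : List Int) (hn : 1 ≤ a.length) :
    PySem.List.pyGetD a (-1) 0 = sm a (a.length - 1) := by
  rw [sm]
  have h : ¬ (a.length - 1 + 1 < a.length) := by omega
  simp only [h, dif_neg, not_false_iff]
  rw [PySem.List.pyGetD_neg_ofNat a 1 0 (by omega) (by omega)]
  simp [List.getD, List.getElem?_eq_getElem (by omega : a.length - 1 < a.length)]

-- fold-min pulls a min out of the initial accumulator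
theorem foldl_min_init (a : List Int) (l : List Nat) (x y : Int) :
    l.foldl (fun m i => min m (a.getD i 0)) (min x y)
      = min x (l.foldl (fun m i => min m (a.getD i 0)) y) := by
  induction l generalizing y with
  | nil => rfl
  | cons i t ih => simp only [List.foldl_cons, min_assoc, ih]

theorem range'_split (lo mid hi : Nat) (h1 : lo ≤ mid) (h2 : mid ≤ hi) :
    List.range' lo (hi - lo) = List.range' lo (mid - lo) ++ List.range' mid (hi - mid) := by
  have h := @List.range'_append lo (mid - lo) (hi - mid) 1
  rw [show lo + 1 * (mid - lo) = mid by omega, show mid - lo + (hi - mid) = hi - lo by omega] at h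
  exact h.symm

theorem segM_single (a : List Int) (lo : Nat) : segM a lo (lo + 1) = a.getD lo 0 := by
  simp [segM]

theorem segM_split (a : List Int) (lo mid hi : Nat) (h1 : lo < mid) (h2 : mid < hi) :
    segM a lo hi = min (segM a lo mid) (segM a mid hi) := by
  rw [segM, range'_split lo mid hi (by omega) (by omega), List.foldl_append]
  obtain ⟨k, hk⟩ : ∃ k, hi - mid = k + 1 := ⟨hi - mid - 1, by omega⟩
  rw [hk, List.range'_succ, List.foldl_cons]
  have : min ((List.range' lo (mid - lo)).foldl (fun m i => min m (a.getD i 0)) (a.getD lo 0))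
        (a.getD mid 0) = min (segM a lo mid) (min (a.getD mid 0) (a.getD mid 0)) := by
    rw [min_self]; rfl
  rw [this, foldl_min_init, ← List.foldl_cons, ← List.range'_succ, ← hk]
  rfl

theorem pm_eq_segM (a : List Int) (k : Nat) (hk : k < a.length) :
    pm a k = segM a 0 (k + 1) := by
  induction k with
  | zero => simp [pm, segM]
  | succ k ih =>
    rw [pm, ih (by omega), segM_split a 0 (k + 1) (k + 2) (by omega) (by omega), segM_single]

theorem sm_eq_segM (a : List Int) (k : Nat) (hk : k < a.length) :
    sm a k = segM a k a.length := by
  have hgen : ∀ d k : Nat, a.length - k = d + 1 → k < a.length → sm a k = segM a k a.length := by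
    intro d
    induction d with
    | zero =>
      intro k hd hk
      rw [sm, dif_neg (by omega), show a.length = k + 1 by omega, segM_single]
    | succ d ih =>
      intro k hd hk
      rw [sm, dif_pos (by omega), ih (k + 1) (by omega) (by omega),
          segM_split a k (k + 1) a.length (by omega) (by omega), segM_single, min_comm]
  exact hgen (a.length - k - 1) k (by omega) hk

-- Python min of a nonempty slice a[lo:hi] is segM
theorem min_slice_eq_segM (a : List Int) (lo hi : Nat) (h1 : lo < hi) (h2 : hi ≤ a.length) :
    (PySem.List.min? (PySem.List.slice a (some (lo : Int)) (some (hi : Int))) (fun x => x)).getD 0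
      = segM a lo hi := by
  rw [PySem.List.slice_natCast]
  have hs : (a.drop lo).take (hi - lo) = (List.range' lo (hi - lo)).map (fun i => a.getD i 0) := by
    apply List.ext_getElem
    · simp; omega
    · intro n hn hn'
      simp only [List.getElem_take, List.getElem_drop, List.getElem_map, List.getElem_range']
      have hlen : n < hi - lo := by simp at hn; omega
      rw [List.getD_eq_getElem?_getD, List.getElem?_eq_getElem (by omega)]
      simp
  rw [hs]
  obtain ⟨k, hk⟩ : ∃ k, hi - lo = k + 1 := ⟨hi - lo - 1, by omega⟩
  rw [hk, List.range'_succ, List.map_cons, PySem.List.min?_id_cons, Option.getD_some,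
      List.foldl_map, segM, hk, List.range'_succ, List.foldl_cons, min_self]

-- the divide-and-conquer helper counts exactly the per-index survivor test
theorem bCount_spec (a : List Int) (lo hi : Nat) (h1 : 1 ≤ lo) (hlh : lo < hi)
    (hhi : hi + 1 ≤ a.length) :
    bCount a lo hi (pm a (lo - 1)) (sm a hi)
      = (((List.range' lo (hi - lo)).countP (condN a) : Nat) : Int) := by
  have hgen : ∀ d lo hi : Nat, hi - lo = d → 1 ≤ lo → lo < hi → hi + 1 ≤ a.length →
      bCount a lo hi (pm a (lo - 1)) (sm a hi)
        = (((List.range' lo (hi - lo)).countP (condN a) : Nat) : Int) := by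
    intro d
    induction d using Nat.strong_induction_on with
    | _ d ih =>
      intro lo hi hd h1 hlh hhi
      by_cases hbase : hi - lo = 1
      · rw [bCount, if_pos hbase, show hi = lo + 1 by omega]
        simp only [PySem.List.pyGetD_natCast]
        rw [show lo + 1 - lo = 1 by omega, List.range'_one, List.countP_singleton]
        by_cases hc : a.getD lo 0 < pm a (lo - 1) ∨ a.getD lo 0 ≤ sm a (lo + 1)
        · rw [if_pos hc]
          have hcn : condN a lo = true := by
            simp only [condN, Bool.or_eq_true, decide_eq_true_eq]
            exact hc
          simp [hcn]
        · rw [if_neg hc]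
          have hcn : condN a lo = false := by
            simp only [condN, Bool.or_eq_false_iff, decide_eq_false_iff_not]
            exact ⟨fun h => hc (Or.inl h), fun h => hc (Or.inr h)⟩
          simp [hcn]
      · rw [bCount]
        simp only [if_neg hbase, dif_pos hlh]
        set mid := (lo + hi) / 2 with hmid
        have hm1 : lo < mid := by omega
        have hm2 : mid < hi := by omega
        have hlmin : (PySem.List.min? (PySem.List.slice a (some (lo : Int)) (some (mid : Int)))
            (fun x => x)).getD 0 = segM a lo mid := min_slice_eq_segM a lo mid hm1 (by omega)
        have hrmin : (PySem.List.min? (PySem.List.slice a (some (mid : Int)) (some (hi : Int)))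
            (fun x => x)).getD 0 = segM a mid hi := min_slice_eq_segM a mid hi hm2 (by omega)
        have hsmin : min (segM a mid hi) (sm a hi) = sm a mid := by
          rw [sm_eq_segM a hi (by omega), sm_eq_segM a mid (by omega),
              segM_split a mid hi a.length hm2 (by omega)]
        have hpmin : min (segM a lo mid) (pm a (lo - 1)) = pm a (mid - 1) := by
          rw [pm_eq_segM a (lo - 1) (by omega), pm_eq_segM a (mid - 1) (by omega),
              show lo - 1 + 1 = lo by omega, show mid - 1 + 1 = mid by omega,
              segM_split a 0 lo mid (by omega) hm1, min_comm]
        rw [hlmin, hrmin, hsmin, hpmin,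
            ih (mid - lo) (by omega) lo mid rfl h1 hm1 (by omega),
            ih (hi - mid) (by omega) mid hi rfl (by omega) hm2 hhi]
        rw [range'_split lo mid hi (by omega) (by omega), List.countP_append]
        push_cast
        ring
  exact hgen (hi - lo) lo hi rfl h1 hlh hhi

theorem loop1_inv (a : List Int) (m : Nat) (h1 : 1 ≤ m) (hm : m ≤ a.length - 1) :
    ((PySem.List.pyRange 1 (m : Int) 1).foldl (aLoop1 a)
        (List.replicate a.length false, PySem.List.pyGetD a 0 0)).2 = pm a (m - 1) ∧
    ((PySem.List.pyRange 1 (m : Int) 1).foldl (aLoop1 a)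
        (List.replicate a.length false, PySem.List.pyGetD a 0 0)).1.length = a.length ∧
    ∀ j : Nat, j < a.length →
      ((PySem.List.pyRange 1 (m : Int) 1).foldl (aLoop1 a)
        (List.replicate a.length false, PySem.List.pyGetD a 0 0)).1.getD j false =
      decide (1 ≤ j ∧ j < m ∧ a.getD j 0 < pm a (j - 1)) := by
  induction m, h1 using Nat.le_induction with
  | base =>
    rw [show ((1 : Nat) : Int) = 1 by norm_num, PySem.List.pyRange_one_eq_nil (by omega),
        List.foldl_nil]
    refine ⟨by simp [pm, PySem.List.pyGetD_zero], by simp, fun j hj => ?_⟩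
    have h : ¬ (1 ≤ j ∧ j < 1 ∧ a.getD j 0 < pm a (j - 1)) := by omega
    have hrep : (List.replicate a.length false).getD j false = false := by
      simp [List.getD, hj]
    rw [hrep, decide_eq_false h]
  | succ m h1 ih =>
    obtain ⟨hV, hL, hG⟩ := ih (by omega)
    rw [show ((m + 1 : Nat) : Int) = (m : Int) + 1 by push_cast; ring,
        PySem.List.pyRange_one_succ_right (by omega : (1:Int) ≤ (m:Int)),
        List.foldl_append, List.foldl_cons, List.foldl_nil]
    set st := (PySem.List.pyRange 1 (m : Int) 1).foldl (aLoop1 a)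
        (List.replicate a.length false, PySem.List.pyGetD a 0 0) with hst
    rw [aLoop1]
    simp only [PySem.List.pyGetD_natCast, hV]
    have hm1 : m + 1 - 1 = m := by omega
    by_cases hlt : a.getD m 0 < pm a (m - 1)
    · rw [if_pos hlt]
      refine ⟨?_, ?_, fun j hj => ?_⟩
      · rw [hm1, pm_succ a m h1]
        exact (min_eq_right (le_of_lt hlt)).symm
      · simpa [PySem.List.pySetD_natCast] using hL
      · rw [PySem.List.pySetD_natCast, getD_set_lt _ _ _ _ _ (show j < st.1.length by omega)]
        by_cases hjm : m = j
        · subst hjm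
          rw [if_pos rfl]
          exact (decide_eq_true ⟨h1, by omega, hlt⟩).symm
        · rw [if_neg hjm, hG j hj]
          have : (1 ≤ j ∧ j < m ∧ a.getD j 0 < pm a (j - 1)) ↔
                 (1 ≤ j ∧ j < m + 1 ∧ a.getD j 0 < pm a (j - 1)) := by
            constructor <;> rintro ⟨ha, hb, hc⟩ <;> exact ⟨ha, by omega, hc⟩
          exact decide_eq_decide.mpr this
    · rw [if_neg hlt]
      refine ⟨?_, hL, fun j hj => ?_⟩
      · rw [hm1, pm_succ a m h1, hV]
        exact (min_eq_left (not_lt.mp hlt)).symm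
      · rw [hG j hj]
        by_cases hjm : j = m
        · subst hjm
          have hx : ¬ (1 ≤ j ∧ j < j ∧ a.getD j 0 < pm a (j - 1)) := by omega
          have hy : ¬ (1 ≤ j ∧ j < j + 1 ∧ a.getD j 0 < pm a (j - 1)) := fun ⟨_, _, hc⟩ => hlt hc
          rw [decide_eq_false hx, decide_eq_false hy]
        · have : (1 ≤ j ∧ j < m ∧ a.getD j 0 < pm a (j - 1)) ↔
                 (1 ≤ j ∧ j < m + 1 ∧ a.getD j 0 < pm a (j - 1)) := by
            constructor <;> rintro ⟨ha, hb, hc⟩ <;> exact ⟨ha, by omega, hc⟩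
          exact decide_eq_decide.mpr this

theorem loop2_inv (a : List Int) (M : List Bool) (hn : 2 ≤ a.length)
    (hM : M.length = a.length ∧ ∀ j : Nat, j < a.length →
      M.getD j false = decide (1 ≤ j ∧ j < a.length - 1 ∧ a.getD j 0 < pm a (j - 1)))
    (k : Nat) (h1 : 1 ≤ k) (hk : k ≤ a.length - 1) (ans : Int) :
    (PySem.List.pyRange ((a.length : Int) - 2) ((k : Int) - 1) (-1)).foldl (aLoop2 a M)
        (ans, sm a (a.length - 1)) =
    (ans + ((PySem.List.pyRange ((a.length : Int) - 2) ((k : Int) - 1) (-1)).countP (condI a) : Int),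
     sm a k) := by
  obtain ⟨hML, hMG⟩ := hM
  have hgen : ∀ d k : Nat, a.length - 1 - k = d → 1 ≤ k → k ≤ a.length - 1 →
      (PySem.List.pyRange ((a.length : Int) - 2) ((k : Int) - 1) (-1)).foldl (aLoop2 a M)
          (ans, sm a (a.length - 1)) =
      (ans + ((PySem.List.pyRange ((a.length : Int) - 2) ((k : Int) - 1) (-1)).countP (condI a) : Int),
       sm a k) := by
    intro d
    induction d with
    | zero =>
      intro k hd h1 hk
      have hk' : k = a.length - 1 := by omega
      subst hk'
      rw [show ((a.length - 1 : Nat) : Int) - 1 = (a.length : Int) - 2 by omega,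
          PySem.List.pyRange_neg_one_eq_nil (by omega), List.foldl_nil]
      simp
    | succ d ih =>
      intro k hd h1 hk
      have hk2 : k + 1 ≤ a.length - 1 := by omega
      have heq : ((k + 1 : Nat) : Int) - 1 = (k : Int) := by push_cast; ring
      have hsnoc : PySem.List.pyRange ((a.length : Int) - 2) ((k : Int) - 1) (-1)
          = PySem.List.pyRange ((a.length : Int) - 2) ((k : Int)) (-1) ++ [(k : Int)] :=
        pyRange_neg_one_snoc _ _ (by omega)
      have hih := ih (k + 1) (by omega) (by omega) hk2
      rw [heq] at hih
      rw [hsnoc, List.foldl_append, List.foldl_cons, List.foldl_nil, hih, aLoop2]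
      simp only [PySem.List.pyGetD_natCast, List.countP_append, List.countP_cons, List.countP_nil]
      have htoNat : ((k : Int)).toNat = k := Int.toNat_natCast k
      have hCI : condI a (k : Int) =
          (decide (a.getD k 0 < pm a (k - 1)) || decide (a.getD k 0 ≤ sm a (k + 1))) := by
        rw [condI, htoNat, PySem.List.pyGetD_natCast]
      have hMk : M.getD k false = decide (a.getD k 0 < pm a (k - 1)) := by
        rw [hMG k (by omega)]
        exact decide_eq_decide.mpr ⟨fun ⟨_, _, hx⟩ => hx, fun hx => ⟨h1, by omega, hx⟩⟩
      have hsmk : sm a k = min (sm a (k + 1)) (a.getD k 0) := sm_succ a k (by omega)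
      by_cases hgt : a.getD k 0 > sm a (k + 1)
      · rw [if_pos hgt, hMk]
        have hc2 : ¬ (a.getD k 0 ≤ sm a (k + 1)) := by omega
        have hsm2 : sm a k = sm a (k + 1) := by rw [hsmk]; exact min_eq_left (by omega)
        by_cases hl : a.getD k 0 < pm a (k - 1)
        · have hci : condI a (k : Int) = true := by rw [hCI, decide_eq_true hl]; simp
          rw [if_pos (decide_eq_true hl), hci, hsm2]
          simp only [Prod.mk.injEq, and_true, if_true]
          omega
        · have hci : condI a (k : Int) = false := by
            rw [hCI, decide_eq_false hl, decide_eq_false hc2]; simp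
          rw [if_neg (by rw [decide_eq_false hl]; exact Bool.false_ne_true), hci, hsm2]
          simp only [Prod.mk.injEq, and_true]
          simp
      · rw [if_neg hgt]
        have hle : a.getD k 0 ≤ sm a (k + 1) := by omega
        have hci : condI a (k : Int) = true := by rw [hCI, decide_eq_true hle]; simp
        have hsm2 : sm a k = a.getD k 0 := by rw [hsmk]; exact min_eq_right (by omega)
        rw [hci, hsm2]
        simp only [Prod.mk.injEq, and_true, if_true]
        omega
  exact hgen (a.length - 1 - k) k rfl h1 hk

theorem solution_A_eval (a : List Int) (hn : 2 ≤ a.length) :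
    solution a = min (a.length : Int) 2 +
      ((PySem.List.pyRange ((a.length : Int) - 2) 0 (-1)).countP (condI a) : Int) := by
  simp only [solution]
  have hm := loop1_inv a (a.length - 1) (by omega) (by omega)
  rw [show ((a.length - 1 : Nat) : Int) = (a.length : Int) - 1 by omega] at hm
  obtain ⟨hV, hL, hG⟩ := hm
  rw [sm_last a (by omega)]
  have h2 := loop2_inv a _ hn ⟨hL, hG⟩ 1 (by omega) (by omega) (min (a.length : Int) 2)
  rw [show ((1 : Nat) : Int) - 1 = 0 by norm_num] at h2
  rw [h2]

-- countP over the Int range equals countP of condN over the Nat range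
theorem countP_pyRange_eq_range' (a : List Int) (n : Nat) :
    ((PySem.List.pyRange 1 ((n : Int) - 1) 1).countP (condI a) : Int)
      = (((List.range' 1 (n - 2)).countP (condN a) : Nat) : Int) := by
  rw [PySem.List.pyRange_one, List.countP_map, List.range'_eq_map_range, List.countP_map,
      show ((n : Int) - 1 - 1).toNat = n - 2 by omega]
  congr 1
  apply List.countP_congr
  intro k _
  have hEq : condI a (1 + (k : Int)) = condN a (1 + k) := by
    rw [show (1 : Int) + (k : Int) = ((1 + k : Nat) : Int) by omega]
    rw [condI, Int.toNat_natCast, PySem.List.pyGetD_natCast]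
    rfl
  simp only [Function.comp_apply, hEq]

theorem solution_alt_eval (a : List Int) (hn : 3 ≤ a.length) :
    solution_alt a = 2 + (((List.range' 1 (a.length - 2)).countP (condN a) : Nat) : Int) := by
  simp only [solution_alt]
  rw [if_neg (by omega)]
  have hfirst : PySem.List.pyGetD a 0 0 = pm a 0 := by
    rw [PySem.List.pyGetD_zero]; rfl
  have hlast : PySem.List.pyGetD a ((a.length : Int) - 1) 0 = sm a (a.length - 1) := by
    rw [show (a.length : Int) - 1 = ((a.length - 1 : Nat) : Int) by omega,
        PySem.List.pyGetD_natCast, sm]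
    rw [dif_neg (by omega)]
  rw [hfirst, hlast, show pm a 0 = pm a (1 - 1) by norm_num,
      show a.length - 1 = a.length - 1 by rfl]
  rw [bCount_spec a 1 (a.length - 1) (by omega) (by omega) (by omega),
      show a.length - 1 - 1 = a.length - 2 by omega]

-- ===== VERDICT (by name: the statement is the Claim_ definition above) =====
theorem solution_spec : Claim_equal_solution := by
  unfold Claim_equal_solution
  intro a _ hpre
  unfold Spec_solution
  by_cases hn : 3 ≤ a.length
  · rw [solution_A_eval a (by omega), solution_alt_eval a hn,
        PySem.List.pyRange_neg_one_eq_reverse,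
        show (0 : Int) + 1 = 1 by norm_num,
        show ((a.length : Int) - 2) + 1 = (a.length : Int) - 1 by ring,
        List.countP_reverse, countP_pyRange_eq_range' a a.length,
        min_eq_right (by omega : (2 : Int) ≤ (a.length : Int))]
  · rcases a with _ | ⟨x, t⟩
    · exact absurd rfl hpre
    rcases t with _ | ⟨y, u⟩
    · simp [solution, solution_alt,
        PySem.List.pyRange_one_eq_nil (by norm_num : (0:Int) ≤ 1),
        PySem.List.pyRange_neg_one_eq_nil (by norm_num : (-1:Int) ≤ 0)]
    rcases u with _ | ⟨z, v⟩
    · simp [solution, solution_alt,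
        PySem.List.pyRange_one_eq_nil (by norm_num : (1:Int) ≤ 1),
        PySem.List.pyRange_neg_one_eq_nil (by norm_num : (0:Int) ≤ 0)]
    · exact absurd (show 3 ≤ (x :: y :: z :: v).length by simp) hn
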